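-- pv_equiv track=rewrite | github.com/debabratahazra/scaler_code | interviewbit/amazin-substr.py | solve
-- ===== SOURCE A (Python) =====
-- def solve(A):
--     char_list = ['a', 'e', 'i', 'o', 'u']
--     count = 0
--     for index in range(len(A)):
--         if (A[index]).lower() in char_list:
--             count += len(A[index:])
--             continue
--     return count % 10003
-- ===== SOURCE B (Python) =====
-- def solve(A):
--     vowels = ('a', 'e', 'i', 'o', 'u')
--     vowel_count = 0
--     total = 0
--     for ch in A:
--         if ch.lower() in vowels:
--             vowel_count += 1
--         total += vowel_count
--     return total % 10003
-- ===== Notes on version B (the rewrite author's own statement) =====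
-- stated objective: faster
-- what changed: Replaces the per-vowel suffix-length (len(A[index:])) additions with a single forward pass maintaining a running vowel count added at every position, so no slices are built.
import Mathlib
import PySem

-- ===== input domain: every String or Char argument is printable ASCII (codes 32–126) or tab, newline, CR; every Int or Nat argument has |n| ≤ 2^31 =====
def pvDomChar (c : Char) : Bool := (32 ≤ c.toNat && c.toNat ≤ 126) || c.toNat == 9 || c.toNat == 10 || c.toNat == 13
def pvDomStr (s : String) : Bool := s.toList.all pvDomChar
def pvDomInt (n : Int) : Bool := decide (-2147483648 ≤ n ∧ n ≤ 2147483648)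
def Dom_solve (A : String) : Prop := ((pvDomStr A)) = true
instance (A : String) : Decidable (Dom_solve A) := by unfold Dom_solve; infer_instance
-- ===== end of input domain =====

-- B replaces A's per-vowel suffix-length slice additions with one forward pass keeping a running vowel count (O(n) instead of O(n^2)).

-- ===== PORT A =====
def solve (A : String) : Int :=
  let s := A.toList
  let charList : List Char := ['a', 'e', 'i', 'o', 'u']
  let count :=
    (PySem.List.pyRange 0 (s.length : Int) 1).foldl
      (fun count index =>
        if PySem.Chars.lowerChar (PySem.List.pyGetD s index ' ') ∈ charList then
          count + ((PySem.List.slice s (some index) none).length : Int)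
        else count)
      (0 : Int)
  PySem.Int.mod count 10003

-- ===== PORT B =====
def solve_alt (A : String) : Int :=
  let vowels : List Char := ['a', 'e', 'i', 'o', 'u']
  let p :=
    A.toList.foldl
      (fun (p : Int × Int) ch =>
        let vc := if PySem.Chars.lowerChar ch ∈ vowels then p.1 + 1 else p.1
        (vc, p.2 + vc))
      (0, 0)
  PySem.Int.mod p.2 10003

-- ===== PRECONDITION & SPEC =====
def Spec_solve (A : String) (out : Int) : Prop := out = solve_alt A
instance (A : String) (out : Int) : Decidable (Spec_solve A out) := by unfold Spec_solve; infer_instance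

-- ===== CLAIM (what is proved, stated in full; the proofs are below) =====
def Claim_equal_solve : Prop := ∀ (A : String), Dom_solve A → Spec_solve A (solve A)

-- ===== LEMMAS AND PROOFS =====

def pvVowel (c : Char) : Bool := decide (PySem.Chars.lowerChar c ∈ (['a', 'e', 'i', 'o', 'u'] : List Char))

-- common reference sum: each vowel contributes the length of its suffix
def pvS : List Char → Int
  | [] => 0
  | c :: t => (if pvVowel c then ((t.length : Int) + 1) else 0) + pvS t

theorem pvA_aux (suf : List Char) : ∀ (pre : List Char) (acc : Int),
    (PySem.List.pyRange (pre.length : Int) ((pre.length + suf.length : Nat) : Int) 1).foldl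
      (fun count index =>
        if PySem.Chars.lowerChar (PySem.List.pyGetD (pre ++ suf) index ' ') ∈ (['a','e','i','o','u'] : List Char) then
          count + ((PySem.List.slice (pre ++ suf) (some index) none).length : Int)
        else count) acc
    = acc + pvS suf := by
  induction suf with
  | nil =>
    intro pre acc
    rw [PySem.List.pyRange_one_eq_nil (by simp)]
    simp [pvS]
  | cons c t ih =>
    intro pre acc
    rw [PySem.List.pyRange_one_cons (by push_cast [List.length_cons]; omega)]
    have hlen : ((pre.length + (c :: t).length : Nat) : Int)
        = (((pre ++ [c]).length + t.length : Nat) : Int) := by simp only [List.length_append, List.length_cons, List.length_nil]; push_cast; omega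
    have hget : PySem.List.pyGetD (pre ++ c :: t) (pre.length : Int) ' ' = c := by
      rw [PySem.List.pyGetD_natCast]
      simp
    have hslice : PySem.List.slice (pre ++ c :: t) (some (pre.length : Int)) none = c :: t := by
      rw [PySem.List.slice_from_natCast]
      simp
    have happ : pre ++ c :: t = (pre ++ [c]) ++ t := by simp
    simp only [List.foldl_cons, hget, hslice]
    have hstep : ((pre.length : Int) + 1) = (((pre ++ [c]).length : Nat) : Int) := by
      simp
    rw [hstep, hlen, happ, ih]
    by_cases hv : PySem.Chars.lowerChar c ∈ (['a','e','i','o','u'] : List Char) <;>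
      simp [hv, pvS, pvVowel] <;> push_cast <;> ring

theorem pvA_eq (l : List Char) :
    (PySem.List.pyRange 0 (l.length : Int) 1).foldl
      (fun count index =>
        if PySem.Chars.lowerChar (PySem.List.pyGetD l index ' ') ∈ (['a','e','i','o','u'] : List Char) then
          count + ((PySem.List.slice l (some index) none).length : Int)
        else count) 0 = pvS l := by
  have h := pvA_aux l [] 0
  simpa using h

theorem pvB_aux (l : List Char) : ∀ (v t : Int),
    (l.foldl (fun (p : Int × Int) ch =>
        let vc := if PySem.Chars.lowerChar ch ∈ (['a','e','i','o','u'] : List Char) then p.1 + 1 else p.1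
        (vc, p.2 + vc)) (v, t)).2
    = t + v * (l.length : Int) + pvS l := by
  induction l with
  | nil => intro v t; simp [pvS]
  | cons c t' ih =>
    intro v tot
    by_cases hv : PySem.Chars.lowerChar c ∈ (['a','e','i','o','u'] : List Char) <;>
      simp only [List.foldl_cons, hv, if_true, if_false, ih, pvS, pvVowel] <;>
      simp <;> ring

-- ===== VERDICT (by name: the statement is the Claim_ definition above) =====
theorem solve_spec : Claim_equal_solve := by
  intro A _
  unfold Spec_solve solve solve_alt
  simp only
  rw [pvA_eq A.toList]
  rw [pvB_aux A.toList 0 0]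
  simp
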